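-- pv_equiv track=rewrite | github.com/iyp36/Ravel_Knit_Words | Ravel Knit Words - Ibnu YP.py | ravel
-- ===== SOURCE A (Python) =====
-- def ravel(knit):
--     ravel= ''
--     ini = 0
--     while ini < len(knit):
--         for i in range(len(knit)+1):
--             ravel += knit[0:i]
--             ini += 1
--     return ravel
-- ===== SOURCE B (Python) =====
-- def ravel(knit):
--     result = ''
--     cur = ''
--     for ch in knit:
--         cur += ch
--         result += cur
--     return result
-- ===== Notes on version B (the rewrite author's own statement) =====
-- stated objective: simpler
-- what changed: Replaces the while/for pair with a counter and repeated knit[0:i] slicing by a single pass over the characters that extends a running prefix accumulator and appends it to the result.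
import Mathlib
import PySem

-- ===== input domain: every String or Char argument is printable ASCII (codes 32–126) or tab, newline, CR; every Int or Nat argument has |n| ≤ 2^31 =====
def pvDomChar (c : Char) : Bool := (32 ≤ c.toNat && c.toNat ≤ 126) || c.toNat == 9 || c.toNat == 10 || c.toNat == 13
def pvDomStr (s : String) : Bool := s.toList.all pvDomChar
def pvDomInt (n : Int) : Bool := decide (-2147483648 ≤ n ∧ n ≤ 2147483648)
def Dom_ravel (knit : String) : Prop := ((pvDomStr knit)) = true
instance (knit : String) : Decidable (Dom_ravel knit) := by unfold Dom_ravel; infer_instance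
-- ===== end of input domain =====

-- B builds the same output with a running-prefix accumulator in one pass instead of
-- re-slicing knit[0:i] each iteration (objective: simpler).

-- ===== PORT A =====
-- A's while loop runs its body exactly once when knit is nonempty (ini jumps past len),
-- and never when knit is empty; the inner for-loop is the fold below.
def ravel (knit : String) : String :=
  if 0 < PySem.Str.len knit then
    (PySem.List.pyRange 0 (PySem.Str.len knit + 1) 1).foldl
      (fun r i => r ++ PySem.Str.slice knit (some 0) (some i)) ""
  else ""

-- ===== PORT B =====
def ravel_alt (knit : String) : String :=
  (knit.toList.foldl
    (fun (st : String × String) ch =>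
      let cur := st.2.push ch
      (st.1 ++ cur, cur)) ("", "")).1

-- ===== PRECONDITION & SPEC =====
def Spec_ravel (knit : String) (out : String) : Prop := out = ravel_alt knit
instance (knit : String) (out : String) : Decidable (Spec_ravel knit out) := by unfold Spec_ravel; infer_instance

-- ===== CLAIM (what is proved, stated in full; the proofs are below) =====
def Claim_equal_ravel : Prop := ∀ (knit : String), Dom_ravel knit → Spec_ravel knit (ravel knit)

-- ===== LEMMAS AND PROOFS =====

/-- Concatenation of the nonempty prefixes of `l`, each extended in front by `cur`. -/
def prefCat (cur : List Char) : List Char → List Char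
  | [] => []
  | c :: t => (cur ++ [c]) ++ prefCat (cur ++ [c]) t

lemma foldl_app {α β : Type} (xs : List α) (g : α → List β) (init : List β) :
    xs.foldl (fun r x => r ++ g x) init = init ++ (xs.map g).flatten := by
  induction xs generalizing init with
  | nil => simp
  | cons x t ih => simp [List.foldl_cons, ih, List.append_assoc]

lemma flatten_take (l cur : List Char) :
    ((List.range l.length).map (fun k => cur ++ l.take (k + 1))).flatten
      = prefCat cur l := by
  induction l generalizing cur with
  | nil => simp [prefCat]
  | cons c t ih =>
      rw [List.length_cons, List.range_succ_eq_map]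
      simp only [List.map_cons, List.map_map, List.flatten_cons, prefCat]
      have hmap : List.map ((fun k => cur ++ List.take (k + 1) (c :: t)) ∘ Nat.succ)
            (List.range t.length)
          = List.map (fun k => (cur ++ [c]) ++ List.take (k + 1) t) (List.range t.length) :=
        List.map_congr_left fun k _ => by
          simp [Function.comp_apply, List.take_succ_cons, List.append_assoc]
      rw [hmap, ih (cur ++ [c])]
      simp [List.append_assoc]

lemma flatten_all_take (l : List Char) :
    ((List.range (l.length + 1)).map l.take).flatten = prefCat [] l := by
  rw [List.range_succ_eq_map]
  simp only [List.map_cons, List.map_map, List.flatten_cons, List.take_zero]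
  have hmap : List.map ((fun n => List.take n l) ∘ Nat.succ) (List.range l.length)
      = List.map (fun k => ([] : List Char) ++ List.take (k + 1) l) (List.range l.length) :=
    List.map_congr_left fun k _ => by simp [Function.comp_apply]
  rw [hmap, flatten_take l []]
  simp

lemma toList_foldl_append {α : Type} (xs : List α) (f : α → String) (init : String) :
    (xs.foldl (fun r i => r ++ f i) init).toList
      = xs.foldl (fun r i => r ++ (f i).toList) init.toList := by
  induction xs generalizing init with
  | nil => rfl
  | cons x t ih => simp [List.foldl_cons, ih]

lemma B_fold (l : List Char) (r c : String) :
    ((l.foldl (fun (st : String × String) ch =>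
        (st.1 ++ st.2.push ch, st.2.push ch)) (r, c)).1.toList,
     (l.foldl (fun (st : String × String) ch =>
        (st.1 ++ st.2.push ch, st.2.push ch)) (r, c)).2.toList)
      = (r.toList ++ prefCat c.toList l, c.toList ++ l) := by
  induction l generalizing r c with
  | nil => simp [prefCat]
  | cons ch t ih =>
      simp only [List.foldl_cons]
      rw [ih (r ++ c.push ch) (c.push ch)]
      simp [prefCat, List.append_assoc]

lemma A_toList (knit : String) :
    (ravel knit).toList = prefCat [] knit.toList := by
  by_cases h : 0 < PySem.Str.len knit
  · rw [ravel, if_pos h, toList_foldl_append]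
    have hlen : PySem.Str.len knit = (knit.toList.length : Int) := by
      simp [PySem.Str.len_eq]
    rw [hlen, PySem.List.pyRange_one]
    have htn : ((knit.toList.length : Int) + 1 - 0).toNat = knit.toList.length + 1 := by
      rw [sub_zero, ← Nat.cast_one, ← Nat.cast_add, Int.toNat_natCast]
    rw [htn, List.foldl_map]
    have hslice : ∀ k : Nat,
        (PySem.Str.slice knit (some 0) (some ((0 : Int) + k))).toList
          = knit.toList.take k := by
      intro k
      simp [PySem.Str.toList_slice, PySem.List.slice_to_natCast]
    simp only [hslice]
    rw [foldl_app, flatten_all_take]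
    simp
  · have h' : ¬ ((0 : Int) < (knit.toList.length : Int)) := by
      simpa [PySem.Str.len_eq] using h
    have hnil : knit.toList = [] := List.eq_nil_of_length_eq_zero (by omega)
    rw [ravel, if_neg h, hnil]
    rfl

lemma B_toList (knit : String) :
    (ravel_alt knit).toList = prefCat [] knit.toList := by
  unfold ravel_alt
  have := B_fold knit.toList "" ""
  have h1 := congrArg Prod.fst this
  simpa using h1

-- ===== VERDICT (by name: the statement is the Claim_ definition above) =====
theorem ravel_spec : Claim_equal_ravel := by
  intro knit _
  unfold Spec_ravel
  apply String.ext
  show (ravel knit).toList = (ravel_alt knit).toList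
  rw [A_toList, B_toList]
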